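-- pv_equiv track=rewrite | github.com/ChrisWeldon/KnitMaine2018 | cleaner.py | valCount
-- ===== SOURCE A (Python) =====
-- def valCount(lst):
-- 	res = {}
-- 	for i in range(len(lst)):
-- 		if i+1 not in lst:
-- 			res[i+1]=0
-- 		try:
-- 			res[lst[i]] += 1
-- 		except KeyError:
-- 			res[lst[i]] = 1
-- 	#del res[0]
--
-- 	return res
-- ===== SOURCE B (Python) =====
-- def valCount(lst):
-- 	# count first, then one pass over enumerate(lst, 1) that zero-fills missing
-- 	# index keys and writes the final count for each element key
-- 	counts = {}
-- 	for x in lst: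
-- 		counts[x] = counts.get(x, 0) + 1
-- 	res = {}
-- 	for i, x in enumerate(lst, 1):
-- 		if i not in counts:
-- 			res[i] = 0
-- 		res[x] = counts.get(x, 0)
-- 	return res
-- ===== Notes on version B (the rewrite author's own statement) =====
-- stated objective: faster
-- what changed: Replaces A's single index-driven loop (which rescans the whole list with 'i+1 not in lst' and counts via try/except increments) by a counting dict built in one pass followed by one enumerate pass that zero-fills missing index keys via an O(1) dict-membership test and writes final counts directly.
import Mathlib
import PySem

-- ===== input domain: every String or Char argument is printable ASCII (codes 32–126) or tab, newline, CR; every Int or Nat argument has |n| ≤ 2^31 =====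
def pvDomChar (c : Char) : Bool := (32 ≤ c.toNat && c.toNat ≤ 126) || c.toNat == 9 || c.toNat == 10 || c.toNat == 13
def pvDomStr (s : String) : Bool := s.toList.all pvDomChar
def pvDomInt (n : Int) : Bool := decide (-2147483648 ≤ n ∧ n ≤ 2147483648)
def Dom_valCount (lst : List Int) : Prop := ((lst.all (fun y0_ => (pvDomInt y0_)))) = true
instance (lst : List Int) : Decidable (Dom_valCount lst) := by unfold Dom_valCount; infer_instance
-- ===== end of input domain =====

-- B replaces A's index-driven single loop (with its 'i+1 not in lst' rescans and
-- try/except counting) by a one-pass counting dict plus one enumerate pass; faster (timed).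


-- ===== PORT A =====
def valCount (lst : List Int) : List (Int × Int) :=
  ((PySem.List.pyRange 0 (PySem.List.len lst)).foldl (fun res i =>
      let res := if (i + 1) ∈ lst then res else res.insert (i + 1) 0
      match PySem.List.pyGet? lst i with
      | some x =>
        match res.get? x with
        | some c => res.insert x (c + 1)   -- try: res[lst[i]] += 1
        | none => res.insert x 1           -- except KeyError: res[lst[i]] = 1
      | none => res)                        -- unreachable: i ∈ range(len(lst))
    (PySem.Dict.empty : PySem.Dict Int Int)).items

-- ===== PORT B =====
def valCount_alt (lst : List Int) : List (Int × Int) :=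
  let counts := lst.foldl (fun d x => d.insert x (d.getD x 0 + 1))
    (PySem.Dict.empty : PySem.Dict Int Int)
  ((PySem.List.enumerate lst 1).foldl (fun res p =>
      let res := if counts.contains p.1 then res else res.insert p.1 0
      res.insert p.2 (counts.getD p.2 0))
    (PySem.Dict.empty : PySem.Dict Int Int)).items

-- ===== PRECONDITION & SPEC =====
def Spec_valCount (lst : List Int) (out : List (Int × Int)) : Prop := out = valCount_alt lst
instance (lst : List Int) (out : List (Int × Int)) : Decidable (Spec_valCount lst out) := by unfold Spec_valCount; infer_instance

-- ===== CLAIM (what is proved, stated in full; the proofs are below) =====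
def Claim_equal_valCount : Prop := ∀ (lst : List Int), Dom_valCount lst → Spec_valCount lst (valCount lst)

-- ===== LEMMAS AND PROOFS =====

-- A's loop body, as a function of the (index, element) pair, with the try/except
-- collapsed to getD (proved equal in pvStepA_match below).
def pvStepA (L : List Int) (d : PySem.Dict Int Int) (p : Int × Int) : PySem.Dict Int Int :=
  let d' := if (p.1 + 1) ∈ L then d else d.insert (p.1 + 1) 0
  d'.insert p.2 (d'.getD p.2 0 + 1)

-- B's loop body, as a function of the 0-based (index, element) pair.
def pvStepB (L : List Int) (d : PySem.Dict Int Int) (p : Int × Int) : PySem.Dict Int Int :=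
  let d' := if (p.1 + 1) ∈ L then d else d.insert (p.1 + 1) 0
  d'.insert p.2 ((L.count p.2 : Int))

def pvFoldA (L p : List Int) : PySem.Dict Int Int :=
  (PySem.List.enumerate p 0).foldl (pvStepA L) PySem.Dict.empty

def pvFoldB (L p : List Int) : PySem.Dict Int Int :=
  (PySem.List.enumerate p 0).foldl (pvStepB L) PySem.Dict.empty

theorem pvStepA_match (L : List Int) (d : PySem.Dict Int Int) (i x : Int) :
    (let d' := if (i + 1) ∈ L then d else d.insert (i + 1) 0
     match d'.get? x with
     | some c => d'.insert x (c + 1)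
     | none => d'.insert x 1) = pvStepA L d (i, x) := by
  unfold pvStepA
  dsimp only
  rcases h : (if (i + 1) ∈ L then d else d.insert (i + 1) 0).get? x with _ | c <;>
    simp [PySem.Dict.getD_eq_get?_getD, h]

theorem pvPortA_eq (lst : List Int) : valCount lst = (pvFoldA lst lst).items := by
  unfold valCount pvFoldA
  rw [PySem.List.enumerate_eq_map_pyRange lst 0, List.foldl_map]
  congr 1
  apply PySem.List.foldl_congr_mem
  intro acc i hi
  rw [PySem.List.mem_pyRange_one] at hi
  have h0 : PySem.List.pyGet? lst i = some (PySem.List.pyGetD lst i 0) := by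
    have hi' : i = ((i.toNat : Nat) : Int) := by omega
    have hlt : i.toNat < lst.length := by
      have := hi.2; simp [PySem.List.len] at this; omega
    rw [hi', PySem.List.pyGet?_natCast, PySem.List.pyGetD_natCast,
      List.getElem?_eq_getElem hlt, List.getD_eq_getElem?_getD,
      List.getElem?_eq_getElem hlt]
    rfl
  rw [h0]
  exact pvStepA_match lst acc i (PySem.List.pyGetD lst i 0)

theorem pvEnumerate_shift {α : Type} (xs : List α) (s : Int) :
    PySem.List.enumerate xs (s + 1) = (PySem.List.enumerate xs s).map (fun p => (p.1 + 1, p.2)) := by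
  induction xs generalizing s with
  | nil => simp [PySem.List.enumerate]
  | cons x t ih => rw [PySem.List.enumerate_cons, PySem.List.enumerate_cons, List.map_cons, ih]

theorem pvPortB_eq (lst : List Int) : valCount_alt lst = (pvFoldB lst lst).items := by
  unfold valCount_alt pvFoldB
  dsimp only
  rw [PySem.Dict.foldl_insert_getD_add_one_eq_counter]
  have h1 : (1 : Int) = 0 + 1 := by norm_num
  rw [h1, pvEnumerate_shift]
  simp only [List.foldl_map]
  congr 1
  apply PySem.List.foldl_congr_mem
  intro d q _
  unfold pvStepB
  rw [PySem.Dict.contains_counter, PySem.Dict.getD_counter]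
  by_cases h : (q.1 + 1) ∈ lst <;>
    simp [h]

def pvF (L : List Int) : Int × Int → Int × Int :=
  fun kv => (kv.1, if kv.1 ∈ L then (L.count kv.1 : Int) else 0)

theorem pvInv (L : List Int) (p : List Int) (hp : p <+: L) :
    (pvFoldA L p).keys.Nodup ∧
    (∀ k : Int, k ∈ (pvFoldA L p).keys ↔ (k ∈ p ∨ (1 ≤ k ∧ k ≤ (p.length : Int) ∧ k ∉ L))) ∧
    (∀ kv ∈ (pvFoldA L p).items, kv.2 = if kv.1 ∈ p then (p.count kv.1 : Int) else 0) ∧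
    ((pvFoldB L p).items = (pvFoldA L p).items.map (pvF L)) := by
  induction p using List.reverseRecOn with
  | nil =>
    simp only [pvFoldA, pvFoldB, PySem.List.enumerate, List.foldl_nil]
    refine ⟨by simp [PySem.Dict.empty], ?_, by simp [PySem.Dict.empty], by simp [PySem.Dict.empty]⟩
    intro k
    simp only [PySem.Dict.empty]
    constructor
    · intro h; simp [PySem.Dict.keys] at h
    · rintro (h | h)
      · simp at h
      · simp at h; omega
  | append_singleton p y ih =>
    have hpl : p <+: L := (p.prefix_append [y]).trans hp
    obtain ⟨hnd, hkeys, hval, hmap⟩ := ih hpl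
    have hyL : y ∈ L := hp.subset (by simp)
    have hsub : ∀ a ∈ p, a ∈ L := fun a ha => hpl.subset ha
    -- unfold one step of the folds
    have hA : pvFoldA L (p ++ [y]) = pvStepA L (pvFoldA L p) ((p.length : Int), y) := by
      unfold pvFoldA
      rw [PySem.List.enumerate_append, List.foldl_append]
      simp [PySem.List.enumerate]
    have hB : pvFoldB L (p ++ [y]) = pvStepB L (pvFoldB L p) ((p.length : Int), y) := by
      unfold pvFoldB
      rw [PySem.List.enumerate_append, List.foldl_append]
      simp [PySem.List.enumerate]
    set dA := pvFoldA L p with hdA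
    set dB := pvFoldB L p with hdB
    set K : Int := (p.length : Int) + 1 with hK
    -- the intermediate dicts after the zero-fill branch
    set dA' : PySem.Dict Int Int := if K ∈ L then dA else dA.insert K 0 with hdA'
    set dB' : PySem.Dict Int Int := if K ∈ L then dB else dB.insert K 0 with hdB'
    have hA' : pvFoldA L (p ++ [y]) = dA'.insert y (dA'.getD y 0 + 1) := by
      rw [hA]; unfold pvStepA; simp only [hdA', hK]
    have hB' : pvFoldB L (p ++ [y]) = dB'.insert y ((L.count y : Int)) := by
      rw [hB]; unfold pvStepB; simp only [hdB', hK]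
    -- facts about dA'
    have hnd' : dA'.keys.Nodup := by
      rw [hdA']; split
      · exact hnd
      · exact PySem.Dict.nodup_keys_insert dA K 0 hnd
    have hKnotkeys : K ∉ L → K ∉ dA.keys := by
      intro hKL hKk
      rcases (hkeys K).mp hKk with h | h
      · exact hKL (hsub K h)
      · omega
    have hkeys' : ∀ k : Int, k ∈ dA'.keys ↔ (k ∈ p ∨ (1 ≤ k ∧ k ≤ (p.length : Int) + 1 ∧ k ∉ L)) := by
      intro k
      rw [hdA']; split
      · rename_i hKL
        rw [hkeys k]
        constructor
        · rintro (h | h)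
          · exact Or.inl h
          · exact Or.inr ⟨h.1, by omega, h.2.2⟩
        · rintro (h | h)
          · exact Or.inl h
          · refine Or.inr ⟨h.1, ?_, h.2.2⟩
            rcases eq_or_lt_of_le h.2.1 with he | hl
            · exact absurd (he ▸ hKL) h.2.2
            · omega
      · rename_i hKL
        rw [PySem.Dict.keys_insert_of_not_contains dA 0
            (by
              rw [← Bool.not_eq_true, PySem.Dict.contains_iff_mem_keys]
              exact hKnotkeys hKL)]
        rw [List.mem_append, hkeys k, List.mem_singleton]
        constructor
        · rintro ((h | h) | h)
          · exact Or.inl h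
          · exact Or.inr ⟨h.1, by omega, h.2.2⟩
          · exact Or.inr ⟨by omega, by omega, h ▸ hKL⟩
        · rintro (h | h)
          · exact Or.inl (Or.inl h)
          · rcases eq_or_lt_of_le h.2.1 with he | hl
            · exact Or.inr (by omega)
            · exact Or.inl (Or.inr ⟨h.1, by omega, h.2.2⟩)
    have hval' : ∀ kv ∈ dA'.items, kv.2 = if kv.1 ∈ p then (p.count kv.1 : Int) else 0 := by
      intro kv hkv
      rw [hdA'] at hkv; revert hkv; split
      · exact fun hkv => hval kv hkv
      · rename_i hKL
        rw [PySem.Dict.items_insert_of_not_contains dA 0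
            (by rw [← Bool.not_eq_true, PySem.Dict.contains_iff_mem_keys]; exact hKnotkeys hKL)]
        intro hkv
        rcases List.mem_append.mp hkv with h | h
        · exact hval kv h
        · rw [List.mem_singleton] at h
          subst h
          simp only
          rw [if_neg (fun hKp => hKL (hsub K hKp))]
    have hmap' : dB'.items = dA'.items.map (pvF L) := by
      rw [hdA', hdB']; split
      · exact hmap
      · rename_i hKL
        have hKA : dA.contains K = false := by
          rw [← Bool.not_eq_true, PySem.Dict.contains_iff_mem_keys]; exact hKnotkeys hKL
        have hkeysBAD : dB.keys = dA.keys := by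
          show dB.items.map Prod.fst = dA.items.map Prod.fst
          rw [hmap, List.map_map]; rfl
        have hKB : dB.contains K = false := by
          rw [← Bool.not_eq_true, PySem.Dict.contains_iff_mem_keys, hkeysBAD]
          exact hKnotkeys hKL
        rw [PySem.Dict.items_insert_of_not_contains dA 0 hKA,
          PySem.Dict.items_insert_of_not_contains dB 0 hKB, hmap, List.map_append]
        congr 1
        simp [pvF, hKL]
    have hkeysBA' : dB'.keys = dA'.keys := by
      show dB'.items.map Prod.fst = dA'.items.map Prod.fst
      rw [hmap', List.map_map]; rfl
    -- dA'.getD y 0 = p.count y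
    have hgetD : dA'.getD y 0 = (p.count y : Int) := by
      by_cases hyp : y ∈ p
      · have hyk : y ∈ dA'.keys := (hkeys' y).mpr (Or.inl hyp)
        have hc : dA'.contains y = true := (PySem.Dict.contains_iff_mem_keys dA' y).mpr hyk
        rcases hg : dA'.get? y with _ | v
        · rw [PySem.Dict.contains_eq_isSome_get?, hg] at hc; simp at hc
        · have hmem := PySem.Dict.mem_items_of_get?_eq_some dA' hg
          have := hval' (y, v) hmem
          rw [PySem.Dict.getD_eq_get?_getD, hg]
          simp only [if_pos hyp] at this
          simpa using this
      · have hyk : y ∉ dA'.keys := by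
          rw [hkeys' y]
          rintro (h | h)
          · exact hyp h
          · exact h.2.2 hyL
        rw [PySem.Dict.getD_of_not_contains dA' 0
          (by rw [← Bool.not_eq_true, PySem.Dict.contains_iff_mem_keys]; exact hyk)]
        rw [List.count_eq_zero_of_not_mem hyp]
        rfl
    -- now the four conjuncts for p ++ [y]
    refine ⟨?_, ?_, ?_, ?_⟩
    · rw [hA']
      exact PySem.Dict.nodup_keys_insert dA' y _ hnd'
    · intro k
      rw [hA', PySem.Dict.mem_keys_insert, hkeys' k]
      simp only [List.mem_append, List.mem_singleton, List.length_append, List.length_singleton]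
      push_cast
      constructor
      · rintro (h | (h | h))
        · exact Or.inl (Or.inr h)
        · exact Or.inl (Or.inl h)
        · exact Or.inr ⟨h.1, by omega, h.2.2⟩
      · rintro ((h | h) | h)
        · exact Or.inr (Or.inl h)
        · exact Or.inl h
        · exact Or.inr (Or.inr ⟨h.1, by omega, h.2.2⟩)
    · intro kv hkv
      rw [hA'] at hkv
      have hcnt : (((p ++ [y]).count y : Nat) : Int) = (p.count y : Int) + 1 := by
        rw [List.count_append]; push_cast; simp
      by_cases hc : dA'.contains y = true
      · rw [PySem.Dict.items_insert_of_contains dA' _ hc] at hkv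
        rcases List.mem_map.mp hkv with ⟨q, hq, hqe⟩
        by_cases hqy : q.1 = y
        · rw [if_pos (by simpa using hqy)] at hqe
          subst hqe
          simp only
          rw [if_pos (by simp), hcnt, hgetD]
        · rw [if_neg (by simp only [beq_iff_eq]; exact hqy)] at hqe
          subst hqe
          have := hval' q hq
          rw [this]
          have hm : q.1 ∈ p ++ [y] ↔ q.1 ∈ p := by
            simp only [List.mem_append, List.mem_singleton]
            exact ⟨fun h => h.resolve_right hqy, Or.inl⟩
          have hct : (p ++ [y]).count q.1 = p.count q.1 := by
            rw [List.count_append]; simp [Ne.symm hqy]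
          by_cases hqp : q.1 ∈ p
          · rw [if_pos hqp, if_pos (hm.mpr hqp), hct]
          · rw [if_neg hqp, if_neg (fun h => hqp (hm.mp h))]
      · rw [PySem.Dict.items_insert_of_not_contains dA' _ (by simpa using hc)] at hkv
        rcases List.mem_append.mp hkv with h | h
        · have := hval' kv h
          have hkvy : kv.1 ≠ y := by
            intro he
            have : kv.1 ∈ dA'.keys := by
              show kv.1 ∈ dA'.items.map Prod.fst
              exact List.mem_map.mpr ⟨kv, h, rfl⟩
            rw [← PySem.Dict.contains_iff_mem_keys, he] at this
            exact absurd this (by simpa using hc)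
          rw [this]
          have hm : kv.1 ∈ p ++ [y] ↔ kv.1 ∈ p := by
            simp only [List.mem_append, List.mem_singleton]
            exact ⟨fun h => h.resolve_right hkvy, Or.inl⟩
          have hct : (p ++ [y]).count kv.1 = p.count kv.1 := by
            rw [List.count_append]; simp [Ne.symm hkvy]
          by_cases hqp : kv.1 ∈ p
          · rw [if_pos hqp, if_pos (hm.mpr hqp), hct]
          · rw [if_neg hqp, if_neg (fun hx => hqp (hm.mp hx))]
        · rw [List.mem_singleton] at h
          subst h
          simp only
          rw [if_pos (by simp), hcnt, hgetD]
    · rw [hA', hB']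
      have hcBA : dB'.contains y = dA'.contains y := by
        by_cases h : y ∈ dA'.keys
        · rw [(PySem.Dict.contains_iff_mem_keys dA' y).mpr h,
            (PySem.Dict.contains_iff_mem_keys dB' y).mpr (hkeysBA' ▸ h)]
        · rw [Bool.eq_iff_iff, PySem.Dict.contains_iff_mem_keys, PySem.Dict.contains_iff_mem_keys,
            hkeysBA']
      by_cases hc : dA'.contains y = true
      · rw [PySem.Dict.items_insert_of_contains dA' _ hc,
          PySem.Dict.items_insert_of_contains dB' _ (hcBA ▸ hc), hmap',
          List.map_map, List.map_map]
        apply List.map_congr_left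
        intro q _
        simp only [Function.comp]
        by_cases hqy : q.1 = y
        · rw [if_pos (by simpa [pvF] using hqy), if_pos (by simpa using hqy)]
          simp [pvF, hyL]
        · rw [if_neg (by simpa [pvF] using hqy), if_neg (by simpa using hqy)]
      · rw [PySem.Dict.items_insert_of_not_contains dA' _ (by simpa using hc),
          PySem.Dict.items_insert_of_not_contains dB' _ (by simp [hcBA, hc]), hmap',
          List.map_append]
        congr 1
        simp [pvF, hyL]

-- ===== VERDICT (by name: the statement is the Claim_ definition above) =====
theorem valCount_spec : Claim_equal_valCount := by
  intro lst _
  unfold Spec_valCount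
  obtain ⟨_, _, hval, hmap⟩ := pvInv lst lst (List.prefix_refl lst)
  rw [pvPortA_eq, pvPortB_eq, hmap]
  conv_lhs => rw [← List.map_id ((pvFoldA lst lst).items)]
  apply List.map_congr_left
  intro kv hkv
  have h := hval kv hkv
  cases kv with
  | mk a b => simp only [pvF, id]; rw [← h]
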